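-- pv_equiv track=rewrite | github.com/zeyuyuyu/abel-causal-advantage-benchmark | evaluate_batch1.py | get_base_dellma_answer
-- ===== SOURCE A (Python) =====
-- base_preference = ["NVDA", "AMD", "META", "GOOGL", "SPY", "GME", "DIS"]
--
-- def get_base_dellma_answer(options):
--     """Base Claude picks based on Dec 2023 AI narrative: NVDA > AMD > META > GOOGL > SPY > GME > DIS"""
--     # Map GOOGL to GOOGL (questions say GOOGL but tickers use GOOG)
--     mapped_options = []
--     for o in options:
--         if o == "GOOG":
--             mapped_options.append("GOOGL")
--         else:
--             mapped_options.append(o)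
--
--     # Also include SPY if it's in the question text but not in tickers
--     # SPY won't be in abel_tickers, so check the question text
--
--     for pref in base_preference:
--         if pref in mapped_options:
--             return pref
--     return mapped_options[0]
-- ===== SOURCE B (Python) =====
-- base_preference = ["NVDA", "AMD", "META", "GOOGL", "SPY", "GME", "DIS"]
--
-- _RANK = {t: i for i, t in enumerate(base_preference)}
--
-- def get_base_dellma_answer(options):
--     """Pick the best-ranked ticker among the options (GOOG counts as GOOGL);
--     if none is preferred, every option shares the sentinel rank and min
--     returns the first option."""
--     mapped = ["GOOGL" if o == "GOOG" else o for o in options]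
--     return min(mapped, key=lambda o: _RANK.get(o, len(base_preference)))
-- ===== Notes on version B (the rewrite author's own statement) =====
-- stated objective: simpler
-- what changed: Replaces the scan over the preference list with an inner list-membership test by a precomputed rank dictionary and a single min(..., key=rank) pass over the options; the mapped_options[0] fallback falls out of the shared sentinel rank.
import Mathlib
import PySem

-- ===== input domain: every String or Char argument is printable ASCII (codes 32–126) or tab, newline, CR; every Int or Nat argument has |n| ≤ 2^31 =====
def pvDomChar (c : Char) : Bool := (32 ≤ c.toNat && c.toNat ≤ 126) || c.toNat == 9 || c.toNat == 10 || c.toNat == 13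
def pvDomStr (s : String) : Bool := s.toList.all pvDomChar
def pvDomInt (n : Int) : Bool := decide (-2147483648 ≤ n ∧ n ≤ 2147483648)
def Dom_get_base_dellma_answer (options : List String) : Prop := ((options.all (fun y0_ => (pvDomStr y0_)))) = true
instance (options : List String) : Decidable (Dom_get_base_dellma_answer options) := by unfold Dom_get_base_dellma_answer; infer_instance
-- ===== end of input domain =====

-- B replaces A's scan over the preference list (with a membership test of the options
-- inside it) by a precomputed rank table and a single min-by-rank pass over the options.
-- Both Pythons raise on [] (A: IndexError, B: ValueError), hence Pre_.

-- ===== PORT A =====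
def basePreference : List String := ["NVDA", "AMD", "META", "GOOGL", "SPY", "GME", "DIS"]

-- A's 'for pref in base_preference: if pref in mapped_options: return pref'
def pickFirst : List String → List String → Option String
  | [], _ => none
  | p :: ps, m => if p ∈ m then some p else pickFirst ps m

def get_base_dellma_answer (options : List String) : String :=
  let mapped := options.foldl (fun acc o => acc ++ [if o = "GOOG" then "GOOGL" else o]) []
  match pickFirst basePreference mapped with
  | some p => p
  | none => (PySem.List.pyGet? mapped 0).getD ""   -- mapped_options[0]; Pre_ excludes the IndexError

-- ===== PORT B =====
-- _RANK = {t: i for i, t in enumerate(base_preference)}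
def rankDict : PySem.Dict String Int :=
  PySem.Dict.ofList ((PySem.List.enumerate basePreference).map (fun p => (p.2, p.1)))

def get_base_dellma_answer_alt (options : List String) : String :=
  let mapped := options.map (fun o => if o = "GOOG" then "GOOGL" else o)
  (PySem.List.min? mapped (fun o => rankDict.getD o (basePreference.length : Int))).getD ""
  -- min([]) is Python's ValueError; Pre_ excludes it

-- ===== PRECONDITION & SPEC =====
-- Both Pythons raise on the empty list (A: IndexError, B: ValueError).
def Pre_get_base_dellma_answer (options : List String) : Prop := options ≠ []
instance (options : List String) : Decidable (Pre_get_base_dellma_answer options) := by unfold Pre_get_base_dellma_answer; infer_instance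
def pvWitness_get_base_dellma_answer : List String := ["GOOG", "GME"]

def Spec_get_base_dellma_answer (options : List String) (out : String) : Prop := out = get_base_dellma_answer_alt options
instance (options : List String) (out : String) : Decidable (Spec_get_base_dellma_answer options out) := by unfold Spec_get_base_dellma_answer; infer_instance

-- ===== CLAIM (what is proved, stated in full; the proofs are below) =====
def Claim_equal_get_base_dellma_answer : Prop := ∀ (options : List String), Dom_get_base_dellma_answer options → Pre_get_base_dellma_answer options → Spec_get_base_dellma_answer options (get_base_dellma_answer options)

-- ===== LEMMAS AND PROOFS =====

-- B's rank key, written out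
def rk (o : String) : Int := rankDict.getD o (basePreference.length : Int)

theorem rk_eq (o : String) : rk o =
    if o = "NVDA" then 0 else if o = "AMD" then 1 else if o = "META" then 2
    else if o = "GOOGL" then 3 else if o = "SPY" then 4 else if o = "GME" then 5
    else if o = "DIS" then 6 else 7 := by
  split_ifs with a b c d e f g
  · subst a; decide
  · subst b; decide
  · subst c; decide
  · subst d; decide
  · subst e; decide
  · subst f; decide
  · subst g; decide
  · have h : rankDict.items = [("NVDA", 0), ("AMD", 1), ("META", 2), ("GOOGL", 3),
      ("SPY", 4), ("GME", 5), ("DIS", 6)] := by decide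
    have e1 : ("NVDA" == o) = false := beq_eq_false_iff_ne.mpr (Ne.symm a)
    have e2 : ("AMD" == o) = false := beq_eq_false_iff_ne.mpr (Ne.symm b)
    have e3 : ("META" == o) = false := beq_eq_false_iff_ne.mpr (Ne.symm c)
    have e4 : ("GOOGL" == o) = false := beq_eq_false_iff_ne.mpr (Ne.symm d)
    have e5 : ("SPY" == o) = false := beq_eq_false_iff_ne.mpr (Ne.symm e)
    have e6 : ("GME" == o) = false := beq_eq_false_iff_ne.mpr (Ne.symm f)
    have e7 : ("DIS" == o) = false := beq_eq_false_iff_ne.mpr (Ne.symm g)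
    simp [rk, PySem.Dict.getD, PySem.Dict.get?, h, List.find?, e1, e2, e3, e4, e5, e6, e7,
      basePreference]

-- A's loop-with-append builds the same list as B's comprehension
theorem mapped_eq (options : List String) (acc : List String) :
    options.foldl (fun acc o => acc ++ [if o = "GOOG" then "GOOGL" else o]) acc
      = acc ++ options.map (fun o => if o = "GOOG" then "GOOGL" else o) := by
  induction options generalizing acc with
  | nil => simp
  | cons x t ih => simp [List.foldl, ih]

-- min? stays at the head when nothing later is strictly smaller
theorem min?_head {α : Type} (key : α → Int) (x : α) (t : List α)
    (h : ∀ y ∈ t, ¬ key y < key x) : PySem.List.min? (x :: t) key = some x := by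
  simp only [PySem.List.min?, List.foldl]
  induction t with
  | nil => rfl
  | cons y ys ih =>
    simp only [List.foldl]
    rw [if_neg (h y (by simp))]
    exact ih (fun z hz => h z (by simp [hz]))

-- the branch workhorse: if p is in m, has minimal rank, and is the unique element of m
-- with that rank, then min-by-rank returns p
theorem min_branch (m : List String) (p : String) (hp : p ∈ m)
    (hmin : ∀ y ∈ m, rk p ≤ rk y)
    (huniq : ∀ y ∈ m, rk y = rk p → y = p) :
    (PySem.List.min? m rk).getD "" = p := by
  have hne : m ≠ [] := by rintro rfl; simp at hp
  obtain ⟨q, hq⟩ : ∃ q, PySem.List.min? m rk = some q := by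
    cases hmq : PySem.List.min? m rk with
    | none => exact absurd ((PySem.List.min?_eq_none_iff m rk).mp hmq) hne
    | some q => exact ⟨q, rfl⟩
  have hqm : q ∈ m := PySem.List.min?_mem hq
  have h1 : rk q ≤ rk p := PySem.List.min?_isMin hq p hp
  have h2 : rk p ≤ rk q := hmin q hqm
  have : q = p := huniq q hqm (le_antisymm h1 h2)
  simp [hq, this]

theorem pickFirst_cons (p : String) (ps m : List String) :
    pickFirst (p :: ps) m = if p ∈ m then some p else pickFirst ps m := rfl

theorem pickFirst_nil (m : List String) : pickFirst [] m = none := rfl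

theorem pf_unfold (m : List String) : pickFirst basePreference m =
      if "NVDA" ∈ m then some "NVDA" else if "AMD" ∈ m then some "AMD"
      else if "META" ∈ m then some "META" else if "GOOGL" ∈ m then some "GOOGL"
      else if "SPY" ∈ m then some "SPY" else if "GME" ∈ m then some "GME"
      else if "DIS" ∈ m then some "DIS" else none := by
  simp only [basePreference, pickFirst_cons, pickFirst_nil]

set_option maxHeartbeats 1600000 in
-- core: A's pick over any nonempty list m equals B's min-by-rank
theorem core (m : List String) (hne : m ≠ []) :
    (match pickFirst basePreference m with
     | some p => p
     | none => (PySem.List.pyGet? m 0).getD "") = (PySem.List.min? m rk).getD "" := by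
  rw [pf_unfold]
  split_ifs with h0 h1 h2 h3 h4 h5 h6
  · exact (min_branch m "NVDA" h0
      (by intro y hy; rw [show rk "NVDA" = 0 from by decide, rk_eq y]
          split_ifs <;> omega)
      (by intro y hy hr; rw [show rk "NVDA" = 0 from by decide, rk_eq y] at hr
          split_ifs at hr <;> first | assumption | omega)).symm
  · exact (min_branch m "AMD" h1
      (by intro y hy; rw [show rk "AMD" = 1 from by decide, rk_eq y]
          split_ifs <;> first | omega | (subst_vars; exact absurd hy (by assumption)))
      (by intro y hy hr; rw [show rk "AMD" = 1 from by decide, rk_eq y] at hr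
          split_ifs at hr <;> first | assumption | omega)).symm
  · exact (min_branch m "META" h2
      (by intro y hy; rw [show rk "META" = 2 from by decide, rk_eq y]
          split_ifs <;> first | omega | (subst_vars; exact absurd hy (by assumption)))
      (by intro y hy hr; rw [show rk "META" = 2 from by decide, rk_eq y] at hr
          split_ifs at hr <;> first | assumption | omega)).symm
  · exact (min_branch m "GOOGL" h3
      (by intro y hy; rw [show rk "GOOGL" = 3 from by decide, rk_eq y]
          split_ifs <;> first | omega | (subst_vars; exact absurd hy (by assumption)))
      (by intro y hy hr; rw [show rk "GOOGL" = 3 from by decide, rk_eq y] at hr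
          split_ifs at hr <;> first | assumption | omega)).symm
  · exact (min_branch m "SPY" h4
      (by intro y hy; rw [show rk "SPY" = 4 from by decide, rk_eq y]
          split_ifs <;> first | omega | (subst_vars; exact absurd hy (by assumption)))
      (by intro y hy hr; rw [show rk "SPY" = 4 from by decide, rk_eq y] at hr
          split_ifs at hr <;> first | assumption | omega)).symm
  · exact (min_branch m "GME" h5
      (by intro y hy; rw [show rk "GME" = 5 from by decide, rk_eq y]
          split_ifs <;> first | omega | (subst_vars; exact absurd hy (by assumption)))
      (by intro y hy hr; rw [show rk "GME" = 5 from by decide, rk_eq y] at hr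
          split_ifs at hr <;> first | assumption | omega)).symm
  · exact (min_branch m "DIS" h6
      (by intro y hy; rw [show rk "DIS" = 6 from by decide, rk_eq y]
          split_ifs <;> first | omega | (subst_vars; exact absurd hy (by assumption)))
      (by intro y hy hr; rw [show rk "DIS" = 6 from by decide, rk_eq y] at hr
          split_ifs at hr <;> first | assumption | omega)).symm
  · -- no preferred ticker present: every rank is the sentinel 7, min? keeps the head
    obtain ⟨x, t, rfl⟩ := List.exists_cons_of_ne_nil hne
    have hall : ∀ y ∈ x :: t, rk y = 7 := by
      intro y hy; rw [rk_eq y]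
      split_ifs <;> first | rfl | (subst_vars; exact absurd hy (by assumption))
    rw [min?_head rk x t (by
      intro y hy
      rw [hall y (by simp [hy]), hall x (by simp)]
      omega)]
    simp [PySem.List.pyGet?, PySem.List.pyIdx?]

-- ===== VERDICT (by name: the statement is the Claim_ definition above) =====
theorem get_base_dellma_answer_spec : Claim_equal_get_base_dellma_answer := by
  intro options _ hpre
  unfold Spec_get_base_dellma_answer get_base_dellma_answer get_base_dellma_answer_alt
  rw [mapped_eq options [], List.nil_append]
  have hne : options.map (fun o => if o = "GOOG" then "GOOGL" else o) ≠ [] := by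
    simpa using hpre
  simpa [rk] using core _ hne
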